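-- pv_equiv track=rewrite | github.com/oussasz/WorldEmbalage | src/ui/main_window.py | _prod_row_matches
-- ===== SOURCE A (Python) =====
-- def _prod_row_matches(row: list[str], a: str | None, b: str | None, c: str | None) -> bool:
--     """Row matcher for finished products (right grid). Dimensions are in 'Dimensions Caisse' column (index 2)."""
--     row_l = [str(x).lower() for x in row]
--     dims = row_l[2] if len(row_l) > 2 else ''
--     haystacks = [dims] + row_l
--     def contains(tok: str) -> bool:
--         for h in haystacks:
--             if tok in h:
--                 return True
--         return False
--     if a and b and c:
--         return contains(f"{a}x{b}x{c}") or (contains(a) and contains(b) and contains(c))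
--     if a and b:
--         return contains(a) and contains(b)
--     if a and c:
--         return contains(a) and contains(c)
--     if b and c:
--         return contains(b) and contains(c)
--     single = a or b or c
--     return contains(single) if single else True
-- ===== SOURCE B (Python) =====
-- def _prod_row_matches(row: list[str], a: str | None, b: str | None, c: str | None) -> bool:
--     """Single pass over the haystacks maintaining per-token found flags (loop inversion),
--     instead of A's per-token haystack scans driven by a six-way branch cascade."""
--     row_l = [str(x).lower() for x in row]
--     dims = row_l[2] if len(row_l) > 2 else ''
--     toks = [t for t in (a, b, c) if t]
--     joined = 'x'.join(toks) if len(toks) == 3 else None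
--     found = [False] * len(toks)
--     found_joined = False
--     for h in [dims] + row_l:
--         for i, t in enumerate(toks):
--             if not found[i] and t in h:
--                 found[i] = True
--         if joined is not None and not found_joined and joined in h:
--             found_joined = True
--     return (found_joined or all(found)) if joined is not None else all(found)
-- ===== Notes on version B (the rewrite author's own statement) =====
-- stated objective: alternative
-- what changed: Inverts the loop structure: instead of A's six-way branch cascade that re-scans the haystack list once per token combination, B makes a single pass over the haystacks maintaining per-token found flags (plus one flag for the joined all-three token) and combines the flags at the end.
import Mathlib
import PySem

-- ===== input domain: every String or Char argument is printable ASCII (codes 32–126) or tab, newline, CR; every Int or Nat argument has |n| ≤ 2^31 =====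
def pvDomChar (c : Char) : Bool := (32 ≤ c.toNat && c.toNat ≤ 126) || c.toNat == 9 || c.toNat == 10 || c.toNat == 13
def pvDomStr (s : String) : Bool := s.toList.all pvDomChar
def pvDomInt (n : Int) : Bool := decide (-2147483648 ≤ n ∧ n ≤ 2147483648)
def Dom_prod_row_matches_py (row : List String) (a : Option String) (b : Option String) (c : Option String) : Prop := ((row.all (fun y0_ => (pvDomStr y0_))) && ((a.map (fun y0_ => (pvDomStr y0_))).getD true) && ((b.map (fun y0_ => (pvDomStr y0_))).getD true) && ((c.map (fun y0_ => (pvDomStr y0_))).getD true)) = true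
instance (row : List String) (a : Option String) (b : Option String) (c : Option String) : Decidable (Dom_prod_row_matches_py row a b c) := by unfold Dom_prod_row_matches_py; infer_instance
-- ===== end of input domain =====

-- B inverts A's loop structure: one pass over the haystacks maintaining per-token found flags, instead of per-token scans driven by a six-way branch cascade (objective: alternative, same cost).


-- ===== PORT A =====
def pvTruthy (o : Option String) : Bool :=
  match o with
  | none => false
  | some s => !(s == "")

def prod_row_matches_py (row : List String) (a : Option String) (b : Option String) (c : Option String) : Bool :=
  let row_l := row.map PySem.Str.lower
  let dims := if 2 < row_l.length then PySem.List.pyGetD row_l 2 "" else ""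
  let haystacks := dims :: row_l
  let contains := fun (tok : String) => haystacks.any (fun h => PySem.Str.isIn tok h)
  let av := a.getD ""
  let bv := b.getD ""
  let cv := c.getD ""
  if pvTruthy a && pvTruthy b && pvTruthy c then
    -- f"{a}x{b}x{c}" rendered as joining the three tokens with the literal "x"
    contains (PySem.Str.join "x" [av, bv, cv]) || (contains av && contains bv && contains cv)
  else if pvTruthy a && pvTruthy b then contains av && contains bv
  else if pvTruthy a && pvTruthy c then contains av && contains cv
  else if pvTruthy b && pvTruthy c then contains bv && contains cv
  else
    -- single = a or b or c; contains(single) if single else True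
    if pvTruthy a then contains av
    else if pvTruthy b then contains bv
    else if pvTruthy c then contains cv
    else true

-- ===== PORT B =====
-- the inner body of B's single pass: update the per-token flags and the joined-token flag for one haystack h
def pvStep (toks : List String) (joined : Option String) (st : List Bool × Bool) (h : String) : List Bool × Bool :=
  (List.zipWith (fun f t => f || PySem.Str.isIn t h) st.1 toks,
   match joined with
   | none => st.2
   | some j => st.2 || PySem.Str.isIn j h)

def prod_row_matches_py_alt (row : List String) (a : Option String) (b : Option String) (c : Option String) : Bool :=
  let row_l := row.map PySem.Str.lower
  let dims := if 2 < row_l.length then PySem.List.pyGetD row_l 2 "" else ""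
  let toks := [a, b, c].filterMap (fun o => match o with
    | none => none
    | some s => if s == "" then none else some s)
  let joined : Option String := if toks.length == 3 then some (PySem.Str.join "x" toks) else none
  let res := (dims :: row_l).foldl (pvStep toks joined) (toks.map (fun _ => false), false)
  match joined with
  | none => res.1.all id
  | some _ => res.2 || res.1.all id

-- ===== PRECONDITION & SPEC =====
def Spec_prod_row_matches_py (row : List String) (a : Option String) (b : Option String) (c : Option String) (out : Bool) : Prop := out = prod_row_matches_py_alt row a b c
instance (row : List String) (a : Option String) (b : Option String) (c : Option String) (out : Bool) : Decidable (Spec_prod_row_matches_py row a b c out) := by unfold Spec_prod_row_matches_py; infer_instance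

-- ===== CLAIM (what is proved, stated in full; the proofs are below) =====
def Claim_equal_prod_row_matches_py : Prop := ∀ (row : List String) (a : Option String) (b : Option String) (c : Option String), Dom_prod_row_matches_py row a b c → Spec_prod_row_matches_py row a b c (prod_row_matches_py row a b c)

-- ===== LEMMAS AND PROOFS =====

theorem pvZwFuse (g1 g2 : Bool → String → Bool) :
    ∀ (flags : List Bool) (toks : List String),
      List.zipWith g2 (List.zipWith g1 flags toks) toks
        = List.zipWith (fun f t => g2 (g1 f t) t) flags toks := by
  intro flags
  induction flags with
  | nil => intro toks; simp
  | cons f fs ih => intro toks; cases toks <;> simp [ih]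

theorem pvZwId : ∀ (flags : List Bool) (toks : List String), flags.length = toks.length →
    List.zipWith (fun f _ => f) flags toks = flags := by
  intro flags
  induction flags with
  | nil => intro toks _; simp
  | cons f fs ih =>
      intro toks hlen
      cases toks with
      | nil => simp at hlen
      | cons t ts =>
          simp only [List.zipWith_cons_cons]
          rw [ih ts (by simpa using hlen)]

theorem pvFoldSpecNone (toks : List String) :
    ∀ (hs : List String) (flags : List Bool) (fj : Bool), flags.length = toks.length →
      hs.foldl (pvStep toks none) (flags, fj)
        = (List.zipWith (fun f t => f || hs.any (fun h => PySem.Str.isIn t h)) flags toks, fj) := by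
  intro hs
  induction hs with
  | nil =>
      intro flags fj hlen
      simp [pvZwId flags toks hlen]
  | cons h hs ih =>
      intro flags fj hlen
      rw [List.foldl_cons,
          show pvStep toks none (flags, fj) h
            = (List.zipWith (fun f t => f || PySem.Str.isIn t h) flags toks, fj) from rfl,
          ih _ _ (by simp [hlen]), pvZwFuse]
      simp [Bool.or_assoc]

theorem pvFoldSpecSome (toks : List String) (j : String) :
    ∀ (hs : List String) (flags : List Bool) (fj : Bool), flags.length = toks.length →
      hs.foldl (pvStep toks (some j)) (flags, fj)
        = (List.zipWith (fun f t => f || hs.any (fun h => PySem.Str.isIn t h)) flags toks,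
           fj || hs.any (fun h => PySem.Str.isIn j h)) := by
  intro hs
  induction hs with
  | nil =>
      intro flags fj hlen
      simp [pvZwId flags toks hlen]
  | cons h hs ih =>
      intro flags fj hlen
      rw [List.foldl_cons,
          show pvStep toks (some j) (flags, fj) h
            = (List.zipWith (fun f t => f || PySem.Str.isIn t h) flags toks,
               fj || PySem.Str.isIn j h) from rfl,
          ih _ _ (by simp [hlen]), pvZwFuse]
      simp [Bool.or_assoc]

theorem pvRun0 (h : String) (hs : List String) :
    List.foldl (pvStep [] none) (pvStep [] none ([], false) h) hs = ([], false) := by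
  rw [← List.foldl_cons, pvFoldSpecNone [] (h :: hs) [] false rfl]
  simp

theorem pvRun1 (t1 : String) (h : String) (hs : List String) :
    List.foldl (pvStep [t1] none) (pvStep [t1] none ([false], false) h) hs
      = ([PySem.Str.isIn t1 h || hs.any (fun x => PySem.Str.isIn t1 x)], false) := by
  rw [← List.foldl_cons, pvFoldSpecNone [t1] (h :: hs) [false] false rfl]
  simp

theorem pvRun2 (t1 t2 : String) (h : String) (hs : List String) :
    List.foldl (pvStep [t1, t2] none) (pvStep [t1, t2] none ([false, false], false) h) hs
      = ([PySem.Str.isIn t1 h || hs.any (fun x => PySem.Str.isIn t1 x),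
          PySem.Str.isIn t2 h || hs.any (fun x => PySem.Str.isIn t2 x)], false) := by
  rw [← List.foldl_cons, pvFoldSpecNone [t1, t2] (h :: hs) [false, false] false rfl]
  simp

theorem pvRun3 (t1 t2 t3 j : String) (h : String) (hs : List String) :
    List.foldl (pvStep [t1, t2, t3] (some j))
        (pvStep [t1, t2, t3] (some j) ([false, false, false], false) h) hs
      = ([PySem.Str.isIn t1 h || hs.any (fun x => PySem.Str.isIn t1 x),
          PySem.Str.isIn t2 h || hs.any (fun x => PySem.Str.isIn t2 x),
          PySem.Str.isIn t3 h || hs.any (fun x => PySem.Str.isIn t3 x)],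
         PySem.Str.isIn j h || hs.any (fun x => PySem.Str.isIn j x)) := by
  rw [← List.foldl_cons, pvFoldSpecSome [t1, t2, t3] j (h :: hs) [false, false, false] false rfl]
  simp

-- ===== VERDICT (by name: the statement is the Claim_ definition above) =====
theorem prod_row_matches_py_spec : Claim_equal_prod_row_matches_py := by
  intro row a b c _
  unfold Spec_prod_row_matches_py prod_row_matches_py prod_row_matches_py_alt
  rcases a with _ | sa <;> rcases b with _ | sb <;> rcases c with _ | sc <;>
    simp only [pvTruthy, Option.getD] <;>
    [skip; by_cases hc : sc = ""; by_cases hb : sb = "";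
     (by_cases hb : sb = "" <;> by_cases hc : sc = "");
     by_cases ha : sa = ""; (by_cases ha : sa = "" <;> by_cases hc : sc = "");
     (by_cases ha : sa = "" <;> by_cases hb : sb = "");
     (by_cases ha : sa = "" <;> by_cases hb : sb = "" <;> by_cases hc : sc = "")] <;>
    simp_all [pvRun0, pvRun1, pvRun2, pvRun3, Bool.and_assoc, Bool.or_comm]
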